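-- pv_equiv track=rewrite | github.com/twoladel/py110 | small_problems/lsbot_practice_problems/practice_problems.py | subarray_products
-- ===== SOURCE A (Python) =====
-- def subarray_products(list): # Wednesday
--     result = []
--     if len(list) < 2:
--         return result
--
--     return [list[start] * list[stop]
--         for start in range(len(list) - 1)
--         for stop in range(start + 1, len(list))
--         if list[stop] % 2 == 0]
-- ===== SOURCE B (Python) =====
-- def subarray_products(list):  # single backward pass maintaining the even values seen to the right
--     blocks = []
--     evens = []
--     for i in range(len(list) - 1, -1, -1):
--         v = list[i]
--         blocks.append([v * e for e in evens])
--         if v % 2 == 0: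
--             evens = [v] + evens
--     result = []
--     for block in reversed(blocks):
--         result += block
--     return result
-- ===== Notes on version B (the rewrite author's own statement) =====
-- stated objective: alternative
-- what changed: Replaces the nested start/stop index scan (which re-tests parity of each later element for every start) by one right-to-left pass that maintains the list of even values seen so far and prepends each element's block of products, emitting the same start-major, index-ascending output.
import Mathlib
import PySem

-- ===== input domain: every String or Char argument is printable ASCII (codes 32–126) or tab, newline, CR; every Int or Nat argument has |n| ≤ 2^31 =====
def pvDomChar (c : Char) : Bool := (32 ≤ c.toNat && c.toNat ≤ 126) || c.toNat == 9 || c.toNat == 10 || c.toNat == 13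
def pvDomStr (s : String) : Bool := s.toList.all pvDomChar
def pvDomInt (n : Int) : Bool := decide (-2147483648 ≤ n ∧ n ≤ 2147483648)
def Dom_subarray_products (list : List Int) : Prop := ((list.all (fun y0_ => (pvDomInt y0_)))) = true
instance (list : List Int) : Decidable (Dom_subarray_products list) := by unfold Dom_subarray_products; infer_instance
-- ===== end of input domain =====

-- B replaces A's nested start/stop scan by one right-to-left pass that maintains the
-- even values seen so far (alternative decomposition; same return value).

-- ===== PORT A =====
def subarray_products (list : List Int) : List Int :=
  let result : List Int := []
  if PySem.List.len list < 2 then result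
  else
    (PySem.List.pyRange 0 (PySem.List.len list - 1) 1).flatMap (fun start =>
      (PySem.List.pyRange (start + 1) (PySem.List.len list) 1).filterMap (fun stop =>
        if PySem.Int.mod (PySem.List.pyGetD list stop 0) 2 == 0 then
          some (PySem.List.pyGetD list start 0 * PySem.List.pyGetD list stop 0)
        else none))

-- ===== PORT B =====
def subarray_products_alt (list : List Int) : List Int :=
  let st := (PySem.List.pyRange (PySem.List.len list - 1) (-1) (-1)).foldl
    (fun (st : List (List Int) × List Int) i =>
      (st.1 ++ [st.2.map (fun e => PySem.List.pyGetD list i 0 * e)],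
       if PySem.Int.mod (PySem.List.pyGetD list i 0) 2 == 0 then
         PySem.List.pyGetD list i 0 :: st.2
       else st.2))
    ([], [])
  st.1.reverse.foldl (fun result block => result ++ block) []

-- ===== PRECONDITION & SPEC =====
def Spec_subarray_products (list : List Int) (out : List Int) : Prop := out = subarray_products_alt list
instance (list : List Int) (out : List Int) : Decidable (Spec_subarray_products list out) := by unfold Spec_subarray_products; infer_instance

-- ===== CLAIM (what is proved, stated in full; the proofs are below) =====
def Claim_equal_subarray_products : Prop := ∀ (list : List Int), Dom_subarray_products list → Spec_subarray_products list (subarray_products list)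

-- ===== LEMMAS AND PROOFS =====

-- the parity test both programs use
def pvEven (e : Int) : Bool := PySem.Int.mod e 2 == 0

-- structural description of the common value: for each element, its products with the
-- even elements strictly to its right, blocks in left-to-right order
def pvGold : List Int → List Int
  | [] => []
  | v :: rest => ((rest.filter pvEven).map (fun e => v * e)) ++ pvGold rest

theorem pv_filterMap_ite {α β : Type} (p : α → Bool) (f : α → β) (l : List α) :
    l.filterMap (fun x => if p x then some (f x) else none) = (l.filter p).map f := by
  induction l with
  | nil => rfl
  | cons x xs ih => by_cases h : p x <;> simp [h, ih]

-- A, after index elimination, in structural form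
theorem pv_gold_flatMap (l : List Int) :
    (List.range (l.length - 1)).flatMap
      (fun k => ((l.drop (k + 1)).filter pvEven).map (fun e => l.getD k 0 * e)) = pvGold l := by
  induction l with
  | nil => rfl
  | cons v rest ih =>
    cases rest with
    | nil => rfl
    | cons w ws =>
      have h1 : (v :: w :: ws).length - 1 = ((w :: ws).length - 1) + 1 := by simp
      rw [h1, List.range_succ_eq_map, List.flatMap_cons, List.flatMap_map]
      show _ ++ _ = _
      rw [pvGold]
      congr 1

-- the inner comprehension of A over stops = start+1 … n-1, as a filter of the suffix
theorem pv_inner (l : List Int) (c : Int) (k : Nat) :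
    (PySem.List.pyRange ((k : Int) + 1) (PySem.List.len l) 1).filterMap (fun stop =>
        if pvEven (PySem.List.pyGetD l stop 0) then
          some (c * PySem.List.pyGetD l stop 0)
        else none)
      = ((l.drop (k + 1)).filter pvEven).map (fun e => c * e) := by
  have hg : (fun stop => if pvEven (PySem.List.pyGetD l stop 0) then
        some (c * PySem.List.pyGetD l stop 0) else none)
      = ((fun x => if pvEven x then some (c * x) else none) ∘
         (fun stop => PySem.List.pyGetD l stop 0)) := rfl
  rw [hg, ← List.filterMap_map,
      PySem.List.map_pyGetD_pyRange l 0 (show (0:Int) ≤ (k : Int) + 1 by omega),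
      pv_filterMap_ite]
  have hk : ((k : Int) + 1).toNat = k + 1 := by omega
  rw [hk]

theorem pv_A_eq_gold (l : List Int) : subarray_products l = pvGold l := by
  unfold subarray_products
  by_cases h2 : PySem.List.len l < 2
  · simp only [if_pos h2]
    simp only [PySem.List.len_eq] at h2
    cases l with
    | nil => rfl
    | cons v rest =>
      cases rest with
      | nil => simp [pvGold]
      | cons w ws => exfalso; simp only [List.length_cons] at h2; omega
  · simp only [if_neg h2]
    rw [PySem.List.pyRange_one, List.flatMap_map]
    simp only [zero_add, sub_zero]
    have hbody : ∀ k : Nat,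
        (PySem.List.pyRange ((k : Int) + 1) (PySem.List.len l) 1).filterMap (fun stop =>
            if PySem.Int.mod (PySem.List.pyGetD l stop 0) 2 == 0 then
              some (PySem.List.pyGetD l (k : Int) 0 * PySem.List.pyGetD l stop 0)
            else none)
          = ((l.drop (k + 1)).filter pvEven).map (fun e => l.getD k 0 * e) := by
      intro k
      have h := pv_inner l (PySem.List.pyGetD l (k : Int) 0) k
      simpa [pvEven] using h
    simp only [hbody]
    have hn : ((PySem.List.len l - 1)).toNat = l.length - 1 := by
      simp only [PySem.List.len_eq]; omega
    rw [hn, pv_gold_flatMap]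

-- B's blocks, one per element from the right: the products of that element with the evens beyond it
def pvBlocks : List Int → List (List Int)
  | [] => []
  | v :: rest => pvBlocks rest ++ [(rest.filter pvEven).map (fun e => v * e)]

-- B's fold state after consuming a suffix, from the right
theorem pv_foldr (l : List Int) :
    l.foldr (fun v st => (st.1 ++ [st.2.map (fun e => v * e)],
        if PySem.Int.mod v 2 == 0 then v :: st.2 else st.2))
      (([], []) : List (List Int) × List Int)
      = (pvBlocks l, l.filter pvEven) := by
  induction l with
  | nil => rfl
  | cons v rest ih =>
    rw [List.foldr_cons, ih]
    by_cases h : pvEven v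
    · simp [pvBlocks, List.filter_cons, pvEven]
    · simp [pvBlocks, List.filter_cons, pvEven]

theorem pv_foldl_append (bs : List (List Int)) (init : List Int) :
    bs.foldl (fun r b => r ++ b) init = init ++ bs.flatten := by
  induction bs generalizing init with
  | nil => simp
  | cons b bs ih => simp [List.foldl_cons, ih]

theorem pv_blocks_flatten (l : List Int) :
    (pvBlocks l).reverse.flatten = pvGold l := by
  induction l with
  | nil => rfl
  | cons v rest ih => simp [pvBlocks, pvGold, ih]

theorem pv_B_eq_gold (l : List Int) : subarray_products_alt l = pvGold l := by
  unfold subarray_products_alt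
  rw [PySem.List.pyRange_neg_one_eq_reverse]
  have h0 : (-1 : Int) + 1 = 0 := by norm_num
  have h1 : PySem.List.len l - 1 + 1 = PySem.List.len l := by ring
  rw [h0, h1]
  have h3 := List.foldr_map (f := fun j => PySem.List.pyGetD l j 0)
    (g := fun v (st : List (List Int) × List Int) => (st.1 ++ [st.2.map (fun e => v * e)],
      if PySem.Int.mod v 2 == 0 then v :: st.2 else st.2))
    (l := PySem.List.pyRange 0 (PySem.List.len l) 1)
    (init := (([], []) : List (List Int) × List Int))
  have hst : (PySem.List.pyRange 0 (PySem.List.len l) 1).reverse.foldl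
      (fun (st : List (List Int) × List Int) i =>
        (st.1 ++ [st.2.map (fun e => PySem.List.pyGetD l i 0 * e)],
         if PySem.Int.mod (PySem.List.pyGetD l i 0) 2 == 0 then
           PySem.List.pyGetD l i 0 :: st.2
         else st.2))
      ([], []) = (pvBlocks l, l.filter pvEven) := by
    rw [List.foldl_reverse, ← h3, PySem.List.map_pyGetD_pyRange_zero, pv_foldr]
  rw [hst, pv_foldl_append, List.nil_append, pv_blocks_flatten]

-- ===== VERDICT (by name: the statement is the Claim_ definition above) =====
theorem subarray_products_spec : Claim_equal_subarray_products := by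
  intro l _
  unfold Spec_subarray_products
  rw [pv_A_eq_gold, pv_B_eq_gold]
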